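-- pv_equiv track=rewrite | github.com/wrosz/art-gallery-problem | test_art gallery problem/triangulacja.py | min_guards
-- ===== SOURCE A (Python) =====
-- def min_guards(coloring):
--     colors_occ = [0, 0, 0]
--     guards = []
--     minimum = []
--     for vertex, color in coloring.items():
--         colors_occ[color] +=1
--     min_occ = min(colors_occ)
--     for i in range(3):
--         if colors_occ[i] == min_occ:
--             minimum.append(i)
--     for el in minimum:
--         g = []
--         for vertex, color in coloring.items():
--             if color == el:
--                 g.append(vertex)
--         guards.append(g)
--     return guards
-- ===== SOURCE B (Python) =====
-- def min_guards(coloring):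
--     occ = [0, 0, 0]
--     buckets = {}
--     for vertex, color in coloring.items():
--         occ[color] += 1
--         buckets.setdefault(color, []).append(vertex)
--     m = min(occ)
--     return [buckets.get(i, []) for i in range(3) if occ[i] == m]
-- ===== Notes on version B (the rewrite author's own statement) =====
-- stated objective: alternative
-- what changed: A single pass builds the color-occurrence array and a dict of vertex buckets keyed by color at once, and a comprehension selects the minimal buckets, replacing A's count pass plus a full rescan of the coloring for every minimal color.
import Mathlib
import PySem

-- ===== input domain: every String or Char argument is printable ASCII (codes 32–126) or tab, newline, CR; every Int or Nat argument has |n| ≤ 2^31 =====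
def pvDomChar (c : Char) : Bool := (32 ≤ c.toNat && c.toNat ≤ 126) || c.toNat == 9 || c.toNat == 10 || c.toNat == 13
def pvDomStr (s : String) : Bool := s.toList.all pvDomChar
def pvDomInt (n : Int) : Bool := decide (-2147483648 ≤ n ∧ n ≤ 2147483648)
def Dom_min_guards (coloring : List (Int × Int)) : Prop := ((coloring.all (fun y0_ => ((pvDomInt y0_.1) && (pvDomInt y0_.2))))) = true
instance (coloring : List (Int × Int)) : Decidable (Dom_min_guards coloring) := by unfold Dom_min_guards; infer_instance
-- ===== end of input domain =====

-- B replaces A's count pass plus one full rescan of the coloring per minimal color by a single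
-- pass that builds the occurrence array and a dict of per-color vertex buckets at once
-- (objective: alternative, same O(n) cost).

-- ===== PORT A =====
def min_guards (coloring : List (Int × Int)) : List (List Int) :=
  -- colors_occ[color] += 1 : pyGetD/pySetD are exact under Pre_ (every color in [-3, 3))
  let colors_occ := coloring.foldl
    (fun occ p => PySem.List.pySetD occ p.2 (PySem.List.pyGetD occ p.2 0 + 1))
    ([0, 0, 0] : List Int)
  -- min(colors_occ): the list is always the 3-element occurrence list, never empty, so getD 0 is never taken
  let min_occ := (PySem.List.min? colors_occ (fun x => x)).getD 0
  let minimum := (PySem.List.pyRange 0 3 1).foldl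
    (fun mn i => if PySem.List.pyGetD colors_occ i 0 == min_occ then mn ++ [i] else mn) []
  minimum.foldl
    (fun gs el =>
      gs ++ [coloring.foldl (fun g p => if p.2 == el then g ++ [p.1] else g) []]) []

-- ===== PORT B =====
def min_guards_alt (coloring : List (Int × Int)) : List (List Int) :=
  -- one pass: occ[color] += 1 and buckets.setdefault(color, []).append(vertex);
  -- setdefault-then-in-place-append is exactly Dict.modify color [] (· ++ [vertex])
  let st := coloring.foldl
    (fun (s : List Int × PySem.Dict Int (List Int)) p =>
      (PySem.List.pySetD s.1 p.2 (PySem.List.pyGetD s.1 p.2 0 + 1),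
       s.2.modify p.2 [] (fun g => g ++ [p.1])))
    (([0, 0, 0] : List Int), PySem.Dict.empty)
  let m := (PySem.List.min? st.1 (fun x => x)).getD 0
  (PySem.List.pyRange 0 3 1).filterMap
    (fun i => if PySem.List.pyGetD st.1 i 0 == m then some (st.2.getD i []) else none)

-- ===== PRECONDITION & SPEC =====
-- Pre_ excludes exactly the inputs where Python A raises IndexError: a color outside [-3, 3)
-- (both Pythons raise there: occ[color] is out of range).
def Pre_min_guards (coloring : List (Int × Int)) : Prop :=
  ∀ p ∈ coloring, -3 ≤ p.2 ∧ p.2 < 3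
instance (coloring : List (Int × Int)) : Decidable (Pre_min_guards coloring) := by
  unfold Pre_min_guards; infer_instance

def pvWitness_min_guards : (List (Int × Int)) := [(7, 0), (8, 1), (9, 1), (10, 2)]

def Spec_min_guards (coloring : List (Int × Int)) (out : List (List Int)) : Prop := out = min_guards_alt coloring
instance (coloring : List (Int × Int)) (out : List (List Int)) : Decidable (Spec_min_guards coloring out) := by unfold Spec_min_guards; infer_instance

-- ===== CLAIM (what is proved, stated in full; the proofs are below) =====
def Claim_equal_min_guards : Prop := ∀ (coloring : List (Int × Int)), Dom_min_guards coloring → Pre_min_guards coloring → Spec_min_guards coloring (min_guards coloring)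

-- ===== LEMMAS AND PROOFS =====

-- B's single pass over a pair of accumulators, projected: the occurrence component is A's count fold
theorem pv_fold_fst (l : List (Int × Int)) (s : List Int × PySem.Dict Int (List Int)) :
    (l.foldl
      (fun (s : List Int × PySem.Dict Int (List Int)) p =>
        (PySem.List.pySetD s.1 p.2 (PySem.List.pyGetD s.1 p.2 0 + 1),
         s.2.modify p.2 [] (fun g => g ++ [p.1]))) s).1 =
    l.foldl (fun occ p => PySem.List.pySetD occ p.2 (PySem.List.pyGetD occ p.2 0 + 1)) s.1 := by
  induction l generalizing s with
  | nil => rfl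
  | cons p t ih => exact ih _

-- and the dict component is the plain bucket fold
theorem pv_fold_snd (l : List (Int × Int)) (s : List Int × PySem.Dict Int (List Int)) :
    (l.foldl
      (fun (s : List Int × PySem.Dict Int (List Int)) p =>
        (PySem.List.pySetD s.1 p.2 (PySem.List.pyGetD s.1 p.2 0 + 1),
         s.2.modify p.2 [] (fun g => g ++ [p.1]))) s).2 =
    l.foldl (fun d p => d.modify p.2 [] (fun g => g ++ [p.1])) s.2 := by
  induction l generalizing s with
  | nil => rfl
  | cons p t ih => exact ih _

-- bucket i of B's dict = the vertices of color i in order (key and value are swapped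
-- relative to PySem.Dict.getD_foldl_modify_append, hence the foldl_map detour)
theorem pv_bucket (l : List (Int × Int)) (c : Int) :
    (l.foldl (fun (d : PySem.Dict Int (List Int)) p => d.modify p.2 [] (fun g => g ++ [p.1]))
      PySem.Dict.empty).getD c [] =
    (l.filter (fun p => p.2 == c)).map (fun p => p.1) := by
  have h := PySem.Dict.getD_foldl_modify_append (l := l.map (fun p => (p.2, p.1)))
      (d := (PySem.Dict.empty : PySem.Dict Int (List Int))) (c := c)
  rw [List.foldl_map] at h
  simpa [List.filter_map, Function.comp] using h

-- the shared selector: [0,1,2] filtered by "occ[i] == m", mapped into groups, in both shapes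
theorem pv_select (p : Int → Bool) (G : Int → List Int) :
    (([0, 1, 2] : List Int).filter p).map G =
    ([0, 1, 2] : List Int).filterMap (fun i => if p i then some (G i) else none) := by
  cases h0 : p 0 <;> cases h1 : p 1 <;> cases h2 : p 2 <;>
    simp [List.filter, List.filterMap, h0, h1, h2]

theorem pv_range03 : PySem.List.pyRange 0 3 1 = [0, 1, 2] := by decide

-- ===== VERDICT (by name: the statement is the Claim_ definition above) =====
theorem min_guards_spec : Claim_equal_min_guards := by
  intro coloring _ _
  unfold Spec_min_guards
  simp only [min_guards, min_guards_alt]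
  rw [pv_fold_fst, pv_fold_snd]
  simp only [pv_range03, PySem.List.foldl_append_if_eq_filter, List.nil_append,
    PySem.List.foldl_append_if, PySem.List.foldl_append_singleton_eq_map, pv_bucket]
  exact pv_select _ _
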